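-- pv_equiv track=rewrite | github.com/QuipNetwork/quip-protocol | tools/cuda_profile_regions.py | _compute_direct_lines
-- ===== SOURCE A (Python) =====
-- def _compute_direct_lines(source_map):
--     """Compute direct lines for each region.
--
--     Direct lines = region's line range minus union of all
--     child regions' ranges. This lets click-to-highlight
--     show only lines belonging directly to a region,
--     excluding nested children.
--
--     Returns dict mapping region_idx -> sorted list of ints.
--     """
--     direct = {}
--     for idx, (start, end) in source_map.items():
--         own = set(range(start, end + 1))
--         # Subtract all children (regions whose range
--         # is strictly contained within this one)
--         for other_idx, (cs, ce) in source_map.items():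
--             if other_idx == idx:
--                 continue
--             if cs >= start and ce <= end and (
--                 cs > start or ce < end
--             ):
--                 own -= set(range(cs, ce + 1))
--         direct[idx] = sorted(own)
--     return direct
-- ===== SOURCE B (Python) =====
-- def _compute_direct_lines(source_map):
--     """Compute direct lines for each region (interval-merge sweep).
--
--     For each region, collect the non-empty strictly-contained child
--     ranges, sort them by start line, and sweep a cursor across the
--     region's range emitting the uncovered gaps.
--     """
--     items = list(source_map.items())
--     direct = {}
--     for idx, (start, end) in items:
--         children = sorted(
--             ((cs, ce)
--              for j, (cs, ce) in items
--              if j != idx and cs >= start and ce <= end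
--              and (cs > start or ce < end) and cs <= ce),
--             key=lambda c: c[0],
--         )
--         lines = []
--         cur = start
--         for cs, ce in children:
--             if cs > cur:
--                 lines.extend(range(cur, cs))
--             if ce >= cur:
--                 cur = ce + 1
--         lines.extend(range(cur, end + 1))
--         direct[idx] = lines
--     return direct
-- ===== Notes on version B (the rewrite author's own statement) =====
-- stated objective: faster
-- what changed: Per region, instead of materialising set(range(start,end+1)) and subtracting a set(range(...)) for every strictly-contained child, B sorts the non-empty contained child intervals by start and sweeps a cursor across the region emitting only the uncovered gaps.
import Mathlib
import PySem

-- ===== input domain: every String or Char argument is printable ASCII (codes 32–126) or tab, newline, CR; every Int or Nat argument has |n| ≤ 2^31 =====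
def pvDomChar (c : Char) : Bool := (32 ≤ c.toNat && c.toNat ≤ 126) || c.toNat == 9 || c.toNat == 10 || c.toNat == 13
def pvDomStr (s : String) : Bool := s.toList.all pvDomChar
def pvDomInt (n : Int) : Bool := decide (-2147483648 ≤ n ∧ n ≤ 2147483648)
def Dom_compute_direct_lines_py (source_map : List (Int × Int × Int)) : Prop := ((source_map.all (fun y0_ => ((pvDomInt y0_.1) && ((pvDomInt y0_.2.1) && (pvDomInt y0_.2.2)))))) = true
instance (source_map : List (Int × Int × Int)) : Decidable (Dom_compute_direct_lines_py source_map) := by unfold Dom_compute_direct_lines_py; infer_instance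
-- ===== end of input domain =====

-- B replaces A's per-region set subtraction over every child range (O(n²·L)) by
-- sorting each region's strictly-contained non-empty child ranges and sweeping a
-- cursor that emits only the uncovered gaps (O(n² + n·k log k + output lines)).

-- ===== PORT A =====
-- inner loop of A for one region (idx, start, end): set(range(start,end+1)) minus all strict children, then sorted
def pvA_region (sm : List (Int × Int × Int)) (idx s e : Int) : List Int :=
  PySem.List.sorted
    (sm.foldl (fun own c =>
        if c.1 = idx then own
        else if c.2.1 ≥ s ∧ c.2.2 ≤ e ∧ (c.2.1 > s ∨ c.2.2 < e) then
          PySem.Set.diff own (PySem.Set.ofList (PySem.List.pyRange c.2.1 (c.2.2 + 1)))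
        else own)
      (PySem.Set.ofList (PySem.List.pyRange s (e + 1))))
    (fun x => x)

def compute_direct_lines_py (source_map : List (Int × Int × Int)) : List (Int × List Int) :=
  (source_map.foldl
    (fun d c => d.insert c.1 (pvA_region source_map c.1 c.2.1 c.2.2))
    PySem.Dict.empty).items

-- ===== PORT B =====
-- inner part of B for one region: sorted non-empty strict children, then a cursor sweep
def pvB_region (sm : List (Int × Int × Int)) (idx s e : Int) : List Int :=
  let children := PySem.List.sorted
    ((sm.filter (fun c => decide (c.1 ≠ idx ∧ c.2.1 ≥ s ∧ c.2.2 ≤ e ∧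
        (c.2.1 > s ∨ c.2.2 < e) ∧ c.2.1 ≤ c.2.2))).map (fun c => (c.2.1, c.2.2)))
    (fun c => c.1)
  let r := children.foldl
    (fun (p : List Int × Int) c =>
      (if c.1 > p.2 then p.1 ++ PySem.List.pyRange p.2 c.1 else p.1,
       if c.2 ≥ p.2 then c.2 + 1 else p.2))
    ([], s)
  r.1 ++ PySem.List.pyRange r.2 (e + 1)

def compute_direct_lines_py_alt (source_map : List (Int × Int × Int)) : List (Int × List Int) :=
  (source_map.foldl
    (fun d c => d.insert c.1 (pvB_region source_map c.1 c.2.1 c.2.2))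
    PySem.Dict.empty).items

-- ===== PRECONDITION & SPEC =====
def Spec_compute_direct_lines_py (source_map : List (Int × Int × Int)) (out : List (Int × List Int)) : Prop := out = compute_direct_lines_py_alt source_map
instance (source_map : List (Int × Int × Int)) (out : List (Int × List Int)) : Decidable (Spec_compute_direct_lines_py source_map out) := by unfold Spec_compute_direct_lines_py; infer_instance

-- ===== CLAIM (what is proved, stated in full; the proofs are below) =====
def Claim_equal_compute_direct_lines_py : Prop := ∀ (source_map : List (Int × Int × Int)), Dom_compute_direct_lines_py source_map → Spec_compute_direct_lines_py source_map (compute_direct_lines_py source_map)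

-- ===== LEMMAS AND PROOFS =====

def pvCov (sm : List (Int × Int × Int)) (idx s e x : Int) : Bool :=
  sm.any (fun c => !decide (c.1 = idx) &&
    decide (c.2.1 ≥ s ∧ c.2.2 ≤ e ∧ (c.2.1 > s ∨ c.2.2 < e)) &&
    decide (c.2.1 ≤ x ∧ x ≤ c.2.2))

theorem contains_ofList_pyRange (a b x : Int) :
    PySem.Set.contains (PySem.Set.ofList (PySem.List.pyRange a b)) x
    = decide (a ≤ x ∧ x < b) := by
  rw [Bool.eq_iff_iff]
  simp [PySem.Set.mem_ofList, PySem.List.mem_pyRange_one]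

theorem pvA_fold (idx s e : Int) :
    ∀ (sm : List (Int × Int × Int)) (p : Int → Bool),
    sm.foldl (fun own c =>
        if c.1 = idx then own
        else if c.2.1 ≥ s ∧ c.2.2 ≤ e ∧ (c.2.1 > s ∨ c.2.2 < e) then
          PySem.Set.diff own (PySem.Set.ofList (PySem.List.pyRange c.2.1 (c.2.2 + 1)))
        else own)
      ((PySem.List.pyRange s (e + 1)).filter p)
    = (PySem.List.pyRange s (e + 1)).filter
        (fun x => p x && !pvCov sm idx s e x) := by
  intro sm
  induction sm with
  | nil => intro p; simp [pvCov]
  | cons c t ih =>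
    intro p
    rw [List.foldl_cons]
    by_cases h1 : c.1 = idx
    · rw [if_pos h1, ih p]
      refine List.filter_congr ?_
      intro x _
      simp [pvCov, h1]
    · rw [if_neg h1]
      by_cases h2 : c.2.1 ≥ s ∧ c.2.2 ≤ e ∧ (c.2.1 > s ∨ c.2.2 < e)
      · rw [if_pos h2]
        have hd : PySem.Set.diff ((PySem.List.pyRange s (e + 1)).filter p)
            (PySem.Set.ofList (PySem.List.pyRange c.2.1 (c.2.2 + 1)))
          = (PySem.List.pyRange s (e + 1)).filter
              (fun x => p x && !decide (c.2.1 ≤ x ∧ x ≤ c.2.2)) := by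
          show ((PySem.List.pyRange s (e + 1)).filter p).filter _ = _
          rw [List.filter_filter]
          refine List.filter_congr ?_
          intro x _
          rw [contains_ofList_pyRange]
          have : decide (c.2.1 ≤ x ∧ x < c.2.2 + 1) = decide (c.2.1 ≤ x ∧ x ≤ c.2.2) := by
            rw [decide_eq_decide]; omega
          rw [this, Bool.and_comm]
        rw [hd, ih]
        refine List.filter_congr ?_
        intro x _
        simp only [pvCov, List.any_cons, h1, decide_false, Bool.not_false,
          Bool.true_and, decide_eq_true h2, Bool.not_or, ← Bool.and_assoc]
      · rw [if_neg h2, ih]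
        refine List.filter_congr ?_
        intro x _
        simp only [pvCov, List.any_cons, h1, decide_false, Bool.not_false,
          decide_eq_false h2, Bool.false_and, Bool.and_false, Bool.false_or]

theorem pvB_sweep (e : Int) :
    ∀ (C : List (Int × Int)) (acc : List Int) (cur : Int),
    C.Pairwise (fun a b => a.1 ≤ b.1) →
    (∀ c ∈ C, c.1 ≤ c.2 ∧ c.2 ≤ e) →
    (C.foldl (fun (p : List Int × Int) c =>
        (if c.1 > p.2 then p.1 ++ PySem.List.pyRange p.2 c.1 else p.1,
         if c.2 ≥ p.2 then c.2 + 1 else p.2)) (acc, cur)).1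
      ++ PySem.List.pyRange
          (C.foldl (fun (p : List Int × Int) c =>
            (if c.1 > p.2 then p.1 ++ PySem.List.pyRange p.2 c.1 else p.1,
             if c.2 ≥ p.2 then c.2 + 1 else p.2)) (acc, cur)).2 (e + 1)
    = acc ++ (PySem.List.pyRange cur (e + 1)).filter
        (fun x => !C.any (fun c => decide (c.1 ≤ x ∧ x ≤ c.2))) := by
  intro C
  induction C with
  | nil => intro acc cur _ _; simp
  | cons c t ih =>
    intro acc cur hsort hb
    rw [List.pairwise_cons] at hsort
    obtain ⟨hhd, ht⟩ := hsort
    obtain ⟨hc1, hc2⟩ := hb c (List.mem_cons_self ..)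
    have hbt : ∀ b ∈ t, b.1 ≤ b.2 ∧ b.2 ≤ e := fun b hbm => hb b (List.mem_cons_of_mem _ hbm)
    rw [List.foldl_cons]
    by_cases hgt : c.1 > cur
    · have hge : c.2 ≥ cur := le_trans (le_of_lt hgt) hc1
      rw [if_pos hgt, if_pos hge, ih _ _ ht hbt]
      have hsplit1 : PySem.List.pyRange cur (e + 1)
          = PySem.List.pyRange cur c.1 ++ PySem.List.pyRange c.1 (e + 1) :=
        PySem.List.pyRange_one_append _ _ _ (le_of_lt hgt) (by omega)
      have hsplit2 : PySem.List.pyRange c.1 (e + 1)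
          = PySem.List.pyRange c.1 (c.2 + 1) ++ PySem.List.pyRange (c.2 + 1) (e + 1) :=
        PySem.List.pyRange_one_append _ _ _ (by omega) (by omega)
      rw [hsplit1, hsplit2, List.filter_append, List.filter_append]
      have f1 : (PySem.List.pyRange cur c.1).filter
          (fun x => !(c :: t).any (fun b => decide (b.1 ≤ x ∧ x ≤ b.2)))
          = PySem.List.pyRange cur c.1 := by
        rw [List.filter_eq_self]
        intro x hx
        rw [PySem.List.mem_pyRange_one] at hx
        have hd : decide (c.1 ≤ x ∧ x ≤ c.2) = false := by
          rw [decide_eq_false_iff_not]; omega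
        have ha : t.any (fun b => decide (b.1 ≤ x ∧ x ≤ b.2)) = false := by
          rw [List.any_eq_false]
          intro b hbm
          have hcb := hhd b hbm
          rw [decide_eq_true_eq]; omega
        rw [List.any_cons, hd, ha, Bool.or_false, Bool.not_false]
      have f2 : (PySem.List.pyRange c.1 (c.2 + 1)).filter
          (fun x => !(c :: t).any (fun b => decide (b.1 ≤ x ∧ x ≤ b.2)))
          = [] := by
        rw [List.filter_eq_nil_iff]
        intro x hx
        rw [PySem.List.mem_pyRange_one] at hx
        have hd : decide (c.1 ≤ x ∧ x ≤ c.2) = true := by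
          rw [decide_eq_true_eq]; omega
        rw [List.any_cons, hd, Bool.true_or, Bool.not_true]; simp
      have f3 : (PySem.List.pyRange (c.2 + 1) (e + 1)).filter
          (fun x => !(c :: t).any (fun b => decide (b.1 ≤ x ∧ x ≤ b.2)))
          = (PySem.List.pyRange (c.2 + 1) (e + 1)).filter
            (fun x => !t.any (fun b => decide (b.1 ≤ x ∧ x ≤ b.2))) := by
        refine List.filter_congr ?_
        intro x hx
        rw [PySem.List.mem_pyRange_one] at hx
        have hd : decide (c.1 ≤ x ∧ x ≤ c.2) = false := by
          rw [decide_eq_false_iff_not]; omega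
        rw [List.any_cons, hd, Bool.false_or]
      rw [f1, f2, f3]
      simp [List.append_assoc]
    · rw [if_neg hgt]
      by_cases hge : c.2 ≥ cur
      · rw [if_pos hge, ih _ _ ht hbt]
        have hsplit : PySem.List.pyRange cur (e + 1)
            = PySem.List.pyRange cur (c.2 + 1) ++ PySem.List.pyRange (c.2 + 1) (e + 1) :=
          PySem.List.pyRange_one_append _ _ _ (by omega) (by omega)
        rw [hsplit, List.filter_append]
        have g1 : (PySem.List.pyRange cur (c.2 + 1)).filter
            (fun x => !(c :: t).any (fun b => decide (b.1 ≤ x ∧ x ≤ b.2)))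
            = [] := by
          rw [List.filter_eq_nil_iff]
          intro x hx
          rw [PySem.List.mem_pyRange_one] at hx
          have hd : decide (c.1 ≤ x ∧ x ≤ c.2) = true := by
            rw [decide_eq_true_eq]; omega
          rw [List.any_cons, hd, Bool.true_or, Bool.not_true]; simp
        have g2 : (PySem.List.pyRange (c.2 + 1) (e + 1)).filter
            (fun x => !(c :: t).any (fun b => decide (b.1 ≤ x ∧ x ≤ b.2)))
            = (PySem.List.pyRange (c.2 + 1) (e + 1)).filter
              (fun x => !t.any (fun b => decide (b.1 ≤ x ∧ x ≤ b.2))) := by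
          refine List.filter_congr ?_
          intro x hx
          rw [PySem.List.mem_pyRange_one] at hx
          have hd : decide (c.1 ≤ x ∧ x ≤ c.2) = false := by
            rw [decide_eq_false_iff_not]; omega
          rw [List.any_cons, hd, Bool.false_or]
        rw [g1, g2]
        simp
      · rw [if_neg hge, ih _ _ ht hbt]
        have g3 : (PySem.List.pyRange cur (e + 1)).filter
            (fun x => !t.any (fun b => decide (b.1 ≤ x ∧ x ≤ b.2)))
            = (PySem.List.pyRange cur (e + 1)).filter
              (fun x => !(c :: t).any (fun b => decide (b.1 ≤ x ∧ x ≤ b.2))) := by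
          refine List.filter_congr ?_
          intro x hx
          rw [PySem.List.mem_pyRange_one] at hx
          have hd : decide (c.1 ≤ x ∧ x ≤ c.2) = false := by
            rw [decide_eq_false_iff_not]; omega
          rw [List.any_cons, hd, Bool.false_or]
        rw [g3]

theorem pv_cov_eq (sm : List (Int × Int × Int)) (idx s e x : Int) :
    (PySem.List.sorted
      ((sm.filter (fun c => decide (c.1 ≠ idx ∧ c.2.1 ≥ s ∧ c.2.2 ≤ e ∧
          (c.2.1 > s ∨ c.2.2 < e) ∧ c.2.1 ≤ c.2.2))).map (fun c => (c.2.1, c.2.2)))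
      (fun c => c.1)).any (fun c => decide (c.1 ≤ x ∧ x ≤ c.2))
    = pvCov sm idx s e x := by
  rw [Bool.eq_iff_iff]
  simp only [List.any_eq_true, PySem.List.mem_sorted, List.mem_map, List.mem_filter, pvCov,
    decide_eq_true_eq, Bool.and_eq_true, Bool.not_eq_true', decide_eq_false_iff_not]
  constructor
  · rintro ⟨c, ⟨cc, ⟨hmem, hq⟩, rfl⟩, hx⟩
    exact ⟨cc, hmem, ⟨hq.1, hq.2.1, hq.2.2.1, hq.2.2.2.1⟩, hx⟩
  · rintro ⟨cc, hmem, ⟨h1, h2⟩, hx⟩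
    exact ⟨(cc.2.1, cc.2.2), ⟨cc, ⟨hmem, ⟨h1, h2.1, h2.2.1, h2.2.2, le_trans hx.1 hx.2⟩⟩, rfl⟩, hx⟩

theorem pv_region_eq (sm : List (Int × Int × Int)) (idx s e : Int) :
    pvA_region sm idx s e = pvB_region sm idx s e := by
  have hA : pvA_region sm idx s e
      = (PySem.List.pyRange s (e + 1)).filter (fun x => !pvCov sm idx s e x) := by
    unfold pvA_region
    have h0 : PySem.Set.ofList (PySem.List.pyRange s (e + 1))
        = (PySem.List.pyRange s (e + 1)).filter (fun _ => true) := by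
      rw [PySem.Set.ofList_eq_self_of_nodup _ (PySem.List.nodup_pyRange_one s (e + 1)),
        List.filter_true]
    rw [h0, pvA_fold]
    have h1 : (PySem.List.pyRange s (e + 1)).filter (fun x => true && !pvCov sm idx s e x)
        = (PySem.List.pyRange s (e + 1)).filter (fun x => !pvCov sm idx s e x) := by
      refine List.filter_congr ?_; intro x _; rw [Bool.true_and]
    rw [h1]
    exact PySem.List.sorted_eq_of_perm_of_pairwise_lt _ _ _ (List.Perm.refl _)
      ((PySem.List.pairwise_lt_pyRange_one s (e + 1)).filter _)
  have hB : pvB_region sm idx s e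
      = (PySem.List.pyRange s (e + 1)).filter (fun x => !pvCov sm idx s e x) := by
    unfold pvB_region
    have hsort := PySem.List.sorted_pairwise
      ((sm.filter (fun c => decide (c.1 ≠ idx ∧ c.2.1 ≥ s ∧ c.2.2 ≤ e ∧
          (c.2.1 > s ∨ c.2.2 < e) ∧ c.2.1 ≤ c.2.2))).map (fun c => (c.2.1, c.2.2)))
      (fun c => c.1)
    have hbnd : ∀ c ∈ PySem.List.sorted
        ((sm.filter (fun c => decide (c.1 ≠ idx ∧ c.2.1 ≥ s ∧ c.2.2 ≤ e ∧
            (c.2.1 > s ∨ c.2.2 < e) ∧ c.2.1 ≤ c.2.2))).map (fun c => (c.2.1, c.2.2)))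
        (fun c => c.1), c.1 ≤ c.2 ∧ c.2 ≤ e := by
      intro c hc
      rw [PySem.List.mem_sorted] at hc
      obtain ⟨cc, hcc, rfl⟩ := List.mem_map.mp hc
      rw [List.mem_filter, decide_eq_true_eq] at hcc
      obtain ⟨-, -, -, hce, -, hne⟩ := hcc
      exact ⟨hne, hce⟩
    rw [pvB_sweep e _ [] s hsort hbnd, List.nil_append]
    refine List.filter_congr ?_
    intro x _
    rw [pv_cov_eq]
  rw [hA, hB]

theorem pv_main (sm : List (Int × Int × Int)) :
    compute_direct_lines_py sm = compute_direct_lines_py_alt sm := by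
  unfold compute_direct_lines_py compute_direct_lines_py_alt
  have h : (fun (d : PySem.Dict Int (List Int)) (c : Int × Int × Int) =>
      d.insert c.1 (pvA_region sm c.1 c.2.1 c.2.2))
    = (fun d c => d.insert c.1 (pvB_region sm c.1 c.2.1 c.2.2)) := by
    funext d c; rw [pv_region_eq]
  rw [h]

-- ===== VERDICT (by name: the statement is the Claim_ definition above) =====
theorem compute_direct_lines_py_spec : Claim_equal_compute_direct_lines_py := by
  intro sm _
  unfold Spec_compute_direct_lines_py
  exact pv_main sm
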